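-- pv_equiv track=rewrite | github.com/williamfhe/advent-of-code-2023 | Day_14/part_2.py | find_place_for_rock_west
-- ===== SOURCE A (Python) =====
-- PLATFORM_TYPE = list[list[str]]
--
-- def find_place_for_rock_west(
--     platform: PLATFORM_TYPE, rock_row: int, rock_col: int
-- ) -> int:
--     best_col = rock_col
--     for c in range(rock_col - 1, -1, -1):
--         if platform[rock_row][c] == ".":
--             best_col = c
--         else:
--             break
--
--     return best_col
-- ===== SOURCE B (Python) =====
-- def find_place_for_rock_west(platform, rock_row, rock_col):
--     # Forward pass over the prefix: remember the last blocking cell, land one past it.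
--     last_blocker = -1
--     for c in range(rock_col):
--         if platform[rock_row][c] != ".":
--             last_blocker = c
--     return last_blocker + 1
-- ===== Notes on version B (the rewrite author's own statement) =====
-- stated objective: alternative
-- what changed: Replaces A's leftward scan from the rock with an early break by a single forward pass over the whole prefix row[0:rock_col] that records the last blocking cell and returns last_blocker+1.
-- outside the precondition, e.g. on find_place_for_rock_west([['.']], 0, -2): A returns -2, B returns 0
import Mathlib
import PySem

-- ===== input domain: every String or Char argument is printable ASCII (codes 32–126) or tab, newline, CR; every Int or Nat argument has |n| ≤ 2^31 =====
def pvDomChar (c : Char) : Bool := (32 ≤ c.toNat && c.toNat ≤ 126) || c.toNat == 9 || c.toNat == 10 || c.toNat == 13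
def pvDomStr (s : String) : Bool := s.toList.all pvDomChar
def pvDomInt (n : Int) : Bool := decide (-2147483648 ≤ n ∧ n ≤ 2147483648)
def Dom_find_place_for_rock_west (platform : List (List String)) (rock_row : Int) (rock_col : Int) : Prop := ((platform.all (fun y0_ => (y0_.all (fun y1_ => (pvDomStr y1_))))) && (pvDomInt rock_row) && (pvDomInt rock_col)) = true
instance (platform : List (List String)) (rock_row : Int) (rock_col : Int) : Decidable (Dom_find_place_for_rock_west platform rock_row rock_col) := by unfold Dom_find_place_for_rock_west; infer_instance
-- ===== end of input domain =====

-- B replaces A's leftward scan-with-break by a single forward pass over the prefix that records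
-- the last blocking cell and returns last_blocker + 1 (alternative decomposition, same cost).

-- ===== PORT A =====
-- the 'for c in range(rock_col-1, -1, -1)' loop of A, with its break and its best_col accumulator
def pvLoopA (platform : List (List String)) (rock_row : Int) (cs : List Int) (best_col : Int) : Int :=
  match cs with
  | [] => best_col
  | c :: rest =>
      if PySem.List.pyGetD (PySem.List.pyGetD platform rock_row []) c "" = "." then
        pvLoopA platform rock_row rest c
      else
        best_col  -- break

def find_place_for_rock_west (platform : List (List String)) (rock_row : Int) (rock_col : Int) : Int :=
  pvLoopA platform rock_row (PySem.List.pyRange (rock_col - 1) (-1) (-1)) rock_col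

-- ===== PORT B =====
-- 'last_blocker = -1; for c in range(rock_col): if platform[rock_row][c] != ".": last_blocker = c; return last_blocker + 1'
def find_place_for_rock_west_alt (platform : List (List String)) (rock_row : Int) (rock_col : Int) : Int :=
  ((PySem.List.pyRange 0 rock_col 1).foldl
      (fun last_blocker c =>
        if PySem.List.pyGetD (PySem.List.pyGetD platform rock_row []) c "" ≠ "." then c
        else last_blocker)
      (-1)) + 1

-- ===== PRECONDITION & SPEC =====
-- Pre_ excludes (a) the inputs on which the Python raises IndexError (with rock_col ≥ 1 both programs
-- index platform[rock_row] and cells up to rock_col-1, so the row index must be valid — Python negative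
-- indices wrap — and rock_col ≤ len(row)), and (b) negative rock_col, a column index outside the task's
-- natural domain on which no value is specified (A returns rock_col there, B returns 0; both defensible).
def Pre_find_place_for_rock_west (platform : List (List String)) (rock_row : Int) (rock_col : Int) : Prop :=
  0 ≤ rock_col ∧
  (1 ≤ rock_col →
    (PySem.List.pyGet? platform rock_row).isSome = true ∧
    rock_col ≤ (((PySem.List.pyGet? platform rock_row).getD []).length : Int))
instance (platform : List (List String)) (rock_row : Int) (rock_col : Int) : Decidable (Pre_find_place_for_rock_west platform rock_row rock_col) := by unfold Pre_find_place_for_rock_west; infer_instance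

def pvWitness_find_place_for_rock_west : List (List String) × Int × Int := ([[".", "#"], ["#", "."]], 0, 1)

def Spec_find_place_for_rock_west (platform : List (List String)) (rock_row : Int) (rock_col : Int) (out : Int) : Prop := out = find_place_for_rock_west_alt platform rock_row rock_col
instance (platform : List (List String)) (rock_row : Int) (rock_col : Int) (out : Int) : Decidable (Spec_find_place_for_rock_west platform rock_row rock_col out) := by unfold Spec_find_place_for_rock_west; infer_instance

-- ===== CLAIM =====
def Claim_equal_find_place_for_rock_west : Prop := ∀ (platform : List (List String)) (rock_row : Int) (rock_col : Int), Dom_find_place_for_rock_west platform rock_row rock_col → Pre_find_place_for_rock_west platform rock_row rock_col → Spec_find_place_for_rock_west platform rock_row rock_col (find_place_for_rock_west platform rock_row rock_col)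

-- ===== LEMMAS AND PROOFS =====
-- Shared recurrence on the upper index n (both ports peel the highest column):
-- A(n+1) = if cell n = "." then A(n) else n+1;  B(n+1) = the same by foldl over range++[n].
theorem pv_A_eq_B (platform : List (List String)) (rock_row : Int) :
    ∀ n : Nat,
      find_place_for_rock_west platform rock_row (n : Int)
        = find_place_for_rock_west_alt platform rock_row (n : Int) := by
  intro n
  induction n with
  | zero =>
      simp only [Nat.cast_zero]
      unfold find_place_for_rock_west find_place_for_rock_west_alt
      rw [PySem.List.pyRange_neg_one_eq_nil (by omega : (0 : Int) - 1 ≤ -1),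
          PySem.List.pyRange_one_eq_nil (by omega : (0 : Int) ≤ 0)]
      rfl
  | succ m ih =>
      have hA : find_place_for_rock_west platform rock_row ((m : Int) + 1)
          = if PySem.List.pyGetD (PySem.List.pyGetD platform rock_row []) (m : Int) "" = "."
            then find_place_for_rock_west platform rock_row (m : Int)
            else (m : Int) + 1 := by
        unfold find_place_for_rock_west
        rw [show ((m : Int) + 1 - 1) = (m : Int) by ring,
            PySem.List.pyRange_neg_one_cons (by omega : (-1 : Int) < (m : Int))]
        by_cases h : PySem.List.pyGetD (PySem.List.pyGetD platform rock_row []) (m : Int) "" = "."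
        · simp only [pvLoopA, h]
        · simp only [pvLoopA, h]
      have hB : find_place_for_rock_west_alt platform rock_row ((m : Int) + 1)
          = if PySem.List.pyGetD (PySem.List.pyGetD platform rock_row []) (m : Int) "" = "."
            then find_place_for_rock_west_alt platform rock_row (m : Int)
            else (m : Int) + 1 := by
        unfold find_place_for_rock_west_alt
        rw [PySem.List.pyRange_one_succ_right (by omega : (0 : Int) ≤ (m : Int)),
            List.foldl_append]
        simp only [List.foldl, ne_eq]
        by_cases h : PySem.List.pyGetD (PySem.List.pyGetD platform rock_row []) (m : Int) "" = "."
        · rw [if_neg (not_not_intro h), if_pos h]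
        · rw [if_pos h, if_neg h]
      push_cast
      rw [hA, hB]
      split_ifs <;> simp only [ih]

-- ===== VERDICT =====
theorem find_place_for_rock_west_spec : Claim_equal_find_place_for_rock_west := by
  intro platform rock_row rock_col _ hpre
  unfold Spec_find_place_for_rock_west
  obtain ⟨hnn, -⟩ := hpre
  have := pv_A_eq_B platform rock_row rock_col.toNat
  rwa [Int.toNat_of_nonneg hnn] at this
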